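-- pv_equiv track=rewrite | github.com/Bombbird2001/Meta-Hacker-Cup | 2021/Qualification Round/A1.py | makeConsistent
-- ===== SOURCE A (Python) =====
-- def makeConsistent(string):
-- 	req = None
-- 	for i in range(65, 91):
-- 		count = 0
-- 		ltr = chr(i)
-- 		isVowel = ltr in ["A", "E", "I", "O", "U"]
-- 		for c in string:
-- 			if c == ltr:
-- 				continue
-- 			if isVowel == (c in ["A", "E", "I", "O", "U"]):
-- 				count += 2
-- 			else:
-- 				count += 1
-- 		if req is None or count < req:
-- 			req = count
-- 	return req
-- ===== SOURCE B (Python) =====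
-- def makeConsistent(string):
--     # One pass over the string to build a frequency table and the vowel total,
--     # then a closed-form cost per target letter (no inner scan per letter).
--     n = len(string)
--     counts = {}
--     vowel_total = 0
--     for c in string:
--         counts[c] = counts.get(c, 0) + 1
--         if c in "AEIOU":
--             vowel_total += 1
--     best = None
--     for i in range(65, 91):
--         ltr = chr(i)
--         k = counts.get(ltr, 0)
--         if ltr in "AEIOU":
--             cost = 2 * (vowel_total - k) + (n - vowel_total)
--         else:
--             cost = vowel_total + 2 * (n - vowel_total - k)
--         if best is None or cost < best:
--             best = cost
--     return best
-- ===== Notes on version B (the rewrite author's own statement) =====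
-- stated objective: faster
-- what changed: B replaces A's 26 full scans of the string (one per target letter) by a single frequency-counting pass plus a closed-form cost per letter.
import Mathlib
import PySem

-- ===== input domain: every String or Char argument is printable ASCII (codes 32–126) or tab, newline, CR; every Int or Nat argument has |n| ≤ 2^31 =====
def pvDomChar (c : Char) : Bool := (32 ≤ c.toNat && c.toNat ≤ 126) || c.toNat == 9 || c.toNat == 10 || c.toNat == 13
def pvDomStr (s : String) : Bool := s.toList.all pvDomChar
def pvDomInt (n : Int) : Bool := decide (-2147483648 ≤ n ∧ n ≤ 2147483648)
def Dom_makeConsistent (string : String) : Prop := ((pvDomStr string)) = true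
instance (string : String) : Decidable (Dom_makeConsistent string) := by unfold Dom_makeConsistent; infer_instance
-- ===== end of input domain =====

-- B replaces A's per-letter scan of the string (26 passes) by one frequency-counting
-- pass plus a closed-form cost per target letter.

-- 'c in ["A","E","I","O","U"]' / 'c in "AEIOU"'
def vI (c : Char) : Bool := decide (c ∈ ['A', 'E', 'I', 'O', 'U'])

-- ===== PORT A =====
-- A's inner loop: scan the whole string for one target letter ltr
def innerCount (s : List Char) (ltr : Char) : Int :=
  s.foldl (fun count c =>
    if c = ltr then count
    else if vI ltr = vI c then count + 2
    else count + 1) 0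

-- the body of A's outer loop: inner scan, then the running-minimum update
def aStep (s : List Char) (req : Option Int) (i : Int) : Option Int :=
  let count := innerCount s (Char.ofNat i.toNat)
  match req with
  | none => some count
  | some r => if count < r then some count else some r

-- 'return req': req is never None after the 26 iterations, .getD 0 extracts the Int
def makeConsistent (string : String) : Int :=
  ((PySem.List.pyRange 65 91 1).foldl (aStep string.toList) none).getD 0

-- ===== PORT B =====
-- the single counting pass: (counts dict, vowel_total)
def bCount (s : List Char) : PySem.Dict Char Int × Int :=
  s.foldl (fun st c =>
    (st.1.insert c (st.1.getD c 0 + 1), if vI c then st.2 + 1 else st.2))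
    (PySem.Dict.empty, 0)

-- B's closed-form cost for one target letter
def bCost (counts : PySem.Dict Char Int) (vowelTotal n : Int) (ltr : Char) : Int :=
  let k := counts.getD ltr 0
  if vI ltr then 2 * (vowelTotal - k) + (n - vowelTotal)
  else vowelTotal + 2 * (n - vowelTotal - k)

-- the body of B's second loop: closed-form cost, then the running-minimum update
def bStep (counts : PySem.Dict Char Int) (vowelTotal n : Int) (best : Option Int) (i : Int) : Option Int :=
  let cost := bCost counts vowelTotal n (Char.ofNat i.toNat)
  match best with
  | none => some cost
  | some b => if cost < b then some cost else some b

def makeConsistent_alt (string : String) : Int :=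
  let s := string.toList
  let st := bCount s
  ((PySem.List.pyRange 65 91 1).foldl (bStep st.1 st.2 (s.length : Int)) none).getD 0

-- ===== PRECONDITION & SPEC =====
def Spec_makeConsistent (string : String) (out : Int) : Prop := out = makeConsistent_alt string
instance (string : String) (out : Int) : Decidable (Spec_makeConsistent string out) := by unfold Spec_makeConsistent; infer_instance

-- ===== CLAIM (what is proved, stated in full; the proofs are below) =====
def Claim_equal_makeConsistent : Prop := ∀ (string : String), Dom_makeConsistent string → Spec_makeConsistent string (makeConsistent string)

-- ===== LEMMAS AND PROOFS =====

-- the closed-form cost B computes, expressed over the raw list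
def costF (ltr : Char) (s : List Char) : Int :=
  if vI ltr then 2 * ((s.countP vI : Int) - (s.count ltr : Int)) + ((s.length : Int) - (s.countP vI : Int))
  else (s.countP vI : Int) + 2 * ((s.length : Int) - (s.countP vI : Int) - (s.count ltr : Int))

-- A's inner scan computes the closed form
theorem innerA (ltr : Char) (s : List Char) : innerCount s ltr = costF ltr s := by
  suffices h : ∀ a : Int, s.foldl (fun count c =>
      if c = ltr then count
      else if vI ltr = vI c then count + 2
      else count + 1) a = a + costF ltr s by
    simpa [innerCount] using h 0
  induction s with
  | nil => intro a; simp [costF]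
  | cons c t ih =>
    intro a
    simp only [List.foldl_cons, ih]
    by_cases hc : c = ltr
    · subst hc
      rcases hv : vI c <;>
        simp [costF, hv, List.countP_cons, List.count_cons] <;>
        push_cast <;> ring
    · have hc' : ¬ ltr = c := fun h => hc h.symm
      rcases hvl : vI ltr <;> rcases hvc : vI c <;>
        simp [costF, hc, hc', hvl, hvc, List.countP_cons, List.count_cons] <;>
        push_cast <;> ring

-- the dict built by B's counting loop holds exact occurrence counts
theorem bCount_fst_getD (s : List Char) (d : PySem.Dict Char Int) (x : Char) :
    (s.foldl (fun d c => d.insert c (d.getD c 0 + 1)) d).getD x 0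
      = d.getD x 0 + (s.count x : Int) := by
  induction s generalizing d with
  | nil => simp
  | cons c t ih =>
    simp only [List.foldl_cons, ih]
    by_cases h : c = x
    · subst h
      simp [PySem.Dict.getD_insert, List.count_cons]
      push_cast; ring
    · have h' : ¬ x = c := fun hh => h hh.symm
      simp [PySem.Dict.getD_insert, List.count_cons, h, h', beq_iff_eq]

-- B's counting pass splits componentwise
theorem bCount_pair (s : List Char) (d : PySem.Dict Char Int) (v : Int) :
    s.foldl (fun st c => (st.1.insert c (st.1.getD c 0 + 1), if vI c then st.2 + 1 else st.2)) (d, v)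
      = (s.foldl (fun d c => d.insert c (d.getD c 0 + 1)) d,
         v + (s.countP vI : Int)) := by
  induction s generalizing d v with
  | nil => simp
  | cons c t ih =>
    simp only [List.foldl_cons, ih, List.countP_cons]
    rcases h : vI c <;> simp [h] <;> push_cast <;> ring

-- folds with pointwise-equal step functions agree
theorem foldl_cong {α β : Type} (l : List β) (f g : α → β → α)
    (h : ∀ acc x, f acc x = g acc x) (init : α) :
    l.foldl f init = l.foldl g init := by
  induction l generalizing init with
  | nil => rfl
  | cons x t ih => simp only [List.foldl_cons, h, ih]

-- the two loop bodies agree on every letter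
theorem cost_eq (s : List Char) (ltr : Char) :
    innerCount s ltr = bCost (bCount s).1 (bCount s).2 (s.length : Int) ltr := by
  have hb : bCount s = (s.foldl (fun d c => d.insert c (d.getD c 0 + 1)) PySem.Dict.empty,
      (0 : Int) + (s.countP vI : Int)) := bCount_pair s PySem.Dict.empty 0
  rw [innerA, hb]
  simp only [bCost, bCount_fst_getD, PySem.Dict.getD_empty, costF]
  split_ifs <;> ring

theorem step_eq (s : List Char) (req : Option Int) (i : Int) :
    aStep s req i = bStep (bCount s).1 (bCount s).2 (s.length : Int) req i := by
  simp only [aStep, bStep, bCost, cost_eq s (Char.ofNat i.toNat)]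

-- ===== VERDICT (by name: the statement is the Claim_ definition above) =====
theorem makeConsistent_spec : Claim_equal_makeConsistent := by
  intro string _
  unfold Spec_makeConsistent
  simp only [makeConsistent, makeConsistent_alt]
  rw [foldl_cong _ _ _ (fun acc x => step_eq string.toList acc x)]
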